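-- pv_equiv track=rewrite | github.com/Next-Liu/Leetcode-Python | 蓝桥杯/差分/改变数组元素.py | printV
-- ===== SOURCE A (Python) =====
-- def printV(nums, V):
--     for i in nums:
--         V.append(0)
--         if i > len(V):
--             for j in range(len(V)):
--                 V[j] = 1
--         else:
--             for k in range(len(V) - i, len(V)):
--                 V[k] = 1
--     return V
-- ===== SOURCE B (Python) =====
-- def printV(nums, V):
--     # Single backward sweep with a running minimum of interval starts,
--     # instead of A's per-step re-marking of a whole suffix (O(n0+n) vs O(n*(n0+n))).
--     # Note: A mutates V in place; B leaves V untouched (return-value equivalence).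
--     n0 = len(V)
--     N = n0 + len(nums)
--     best = N  # sentinel: never <= any index j < N
--     out = []
--     for j in range(N - 1, -1, -1):
--         if j >= n0:
--             best = min(best, j + 1 - nums[j - n0])
--         out.append(1 if best <= j else (V[j] if j < n0 else 0))
--     out.reverse()
--     return out
-- ===== Notes on version B (the rewrite author's own statement) =====
-- stated objective: faster
-- what changed: A re-marks a whole suffix of the growing array at every step (nested loops); B does a single backward sweep over the final index range carrying a running minimum of interval start positions, building the result in one pass.
import Mathlib
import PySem

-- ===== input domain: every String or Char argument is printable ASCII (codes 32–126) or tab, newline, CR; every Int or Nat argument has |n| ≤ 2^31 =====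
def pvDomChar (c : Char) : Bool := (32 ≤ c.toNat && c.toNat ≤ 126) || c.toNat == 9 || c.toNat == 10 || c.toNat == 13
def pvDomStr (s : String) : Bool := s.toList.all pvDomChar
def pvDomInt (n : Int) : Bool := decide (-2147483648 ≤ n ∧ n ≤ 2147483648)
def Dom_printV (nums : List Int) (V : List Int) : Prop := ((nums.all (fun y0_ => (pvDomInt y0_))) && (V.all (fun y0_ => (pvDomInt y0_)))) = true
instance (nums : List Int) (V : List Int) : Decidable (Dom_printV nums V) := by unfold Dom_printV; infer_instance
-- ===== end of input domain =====

-- B replaces A's per-step re-marking of a growing suffix by a single backward sweep with a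
-- running minimum of interval starts (objective: faster). A mutates V in place, B does not;
-- the equivalence proved here is about the return value only.

-- ===== PORT A =====
-- inner loops 'for j in range(..): V[j] = 1' become foldl/set; the loop indices are
-- nonnegative whenever the branch runs (then-branch starts at 0; else-branch start
-- len(V)-i ≥ 0 since i ≤ len(V)), so k.toNat is exact there.
def printV (nums : List Int) (V : List Int) : List Int :=
  nums.foldl (fun W i =>
    let W1 := W ++ [0]
    if ((W1.length : Int) < i) then
      (PySem.List.pyRange 0 (W1.length : Int) 1).foldl (fun X j => X.set j.toNat 1) W1
    else
      (PySem.List.pyRange ((W1.length : Int) - i) (W1.length : Int) 1).foldl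
        (fun X k => X.set k.toNat 1) W1) V

-- ===== PORT B =====
-- literal port of Source B: one fold over range(N-1, -1, -1) carrying (best, out); out is
-- built by append and reversed at the end, exactly as in Source B.
def printV_alt (nums : List Int) (V : List Int) : List Int :=
  let n0 := V.length
  let N : Int := (n0 : Int) + nums.length
  let st := (PySem.List.pyRange (N - 1) (-1) (-1)).foldl
    (fun (st : Int × List Int) j =>
      let best := if (n0 : Int) ≤ j then min st.1 (j + 1 - nums.getD (j - n0).toNat 0) else st.1
      (best, st.2 ++ [if best ≤ j then 1 else if j < (n0 : Int) then V.getD j.toNat 0 else 0]))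
    (N, ([] : List Int))
  st.2.reverse

-- ===== PRECONDITION & SPEC =====
def Spec_printV (nums : List Int) (V : List Int) (out : List Int) : Prop := out = printV_alt nums V
instance (nums : List Int) (V : List Int) (out : List Int) : Decidable (Spec_printV nums V out) := by unfold Spec_printV; infer_instance

-- ===== CLAIM (what is proved, stated in full; the proofs are below) =====
def Claim_equal_printV : Prop := ∀ (nums : List Int) (V : List Int), Dom_printV nums V → Spec_printV nums V (printV nums V)

-- ===== LEMMAS AND PROOFS =====

-- value of the marking interval start produced by step t (0-based): position j gets marked
-- by step t iff j ≤ n0+t and val n0 nums t ≤ j.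
def pvVal (n0 : Nat) (nums : List Int) (t : Nat) : Int := (n0 : Int) + 1 + t - nums.getD t 0

def pvMark (n0 : Nat) (nums : List Int) (j : Nat) : Bool :=
  (List.range nums.length).any (fun t =>
    decide ((j : Int) ≤ (n0 : Int) + t ∧ pvVal n0 nums t ≤ (j : Int)))

def pvSpecList (nums V : List Int) : List Int :=
  (List.range (V.length + nums.length)).map (fun j =>
    if pvMark V.length nums j then 1 else V.getD j 0)

lemma pvSpecList_length (nums V : List Int) :
    (pvSpecList nums V).length = V.length + nums.length := by
  simp [pvSpecList]

-- the inner marking fold, pointwise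
lemma pvSet_length (W : List Int) (a b : Int) :
    ((PySem.List.pyRange a b 1).foldl (fun X k => X.set k.toNat 1) W).length = W.length := by
  generalize h : (b - a).toNat = n
  induction n generalizing a W with
  | zero => rw [PySem.List.pyRange_one_eq_nil (by omega)]; rfl
  | succ n ih =>
      rw [PySem.List.pyRange_one_cons (by omega)]
      simp only [List.foldl_cons]
      rw [ih _ (a + 1) (by omega)]
      simp

lemma pvSet_getD (W : List Int) (a b : Int) (ha : 0 ≤ a) (j : Nat) :
    ((PySem.List.pyRange a b 1).foldl (fun X k => X.set k.toNat 1) W).getD j 0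
      = if a ≤ (j : Int) ∧ (j : Int) < b ∧ j < W.length then 1 else W.getD j 0 := by
  generalize h : (b - a).toNat = n
  induction n generalizing a W with
  | zero =>
      rw [PySem.List.pyRange_one_eq_nil (by omega)]
      simp only [List.foldl_nil]
      rw [if_neg (by omega)]
  | succ n ih =>
      rw [PySem.List.pyRange_one_cons (by omega)]
      simp only [List.foldl_cons]
      rw [ih _ (a + 1) (by omega) (by omega)]
      simp only [List.length_set]
      by_cases hj : (j : Int) = a
      · have hja : j = a.toNat := by omega
        subst hja
        by_cases hlen : a.toNat < W.length
        · rw [if_neg (by omega), if_pos ⟨by omega, by omega, hlen⟩,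
            List.getD_eq_getElem?_getD, List.getElem?_set_self hlen]
          simp
        · rw [if_neg (by omega), if_neg (by push Not; intro _ _; omega)]
          rw [List.getD_eq_getElem?_getD, List.getElem?_set, if_pos rfl, if_neg hlen]
          have hnone : W[a.toNat]? = none := List.getElem?_eq_none (by omega)
          simp [List.getD_eq_getElem?_getD, hnone]
      · have hset : (W.set a.toNat 1).getD j 0 = W.getD j 0 := by
          rw [List.getD_eq_getElem?_getD, List.getElem?_set,
            if_neg (by omega), ← List.getD_eq_getElem?_getD]
        rw [hset]
        by_cases hc : a ≤ (j : Int) ∧ (j : Int) < b ∧ j < W.length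
        · rw [if_pos (by omega), if_pos hc]
        · rw [if_neg (by omega), if_neg hc]

lemma pvMark_iff (n0 : Nat) (nums : List Int) (j : Nat) :
    pvMark n0 nums j = true ↔
      ∃ t : Nat, t < nums.length ∧ (j : Int) ≤ (n0 : Int) + t ∧ pvVal n0 nums t ≤ (j : Int) := by
  unfold pvMark
  simp [List.any_eq_true, List.mem_range]

lemma pvMark_false_of_ge (n0 : Nat) (nums : List Int) (j : Nat)
    (h : n0 + nums.length ≤ j) : pvMark n0 nums j = false := by
  rw [← Bool.not_eq_true, pvMark_iff]
  rintro ⟨t, ht, h1, -⟩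
  omega

lemma pvMark_append_iff (n0 : Nat) (xs : List Int) (i : Int) (j : Nat) :
    pvMark n0 (xs ++ [i]) j = true ↔
      (pvMark n0 xs j = true ∨
        ((j : Int) ≤ (n0 : Int) + xs.length ∧ (n0 : Int) + 1 + xs.length - i ≤ (j : Int))) := by
  rw [pvMark_iff, pvMark_iff]
  constructor
  · rintro ⟨t, ht, h1, h2⟩
    simp only [List.length_append, List.length_cons, List.length_nil] at ht
    by_cases htn : t < xs.length
    · exact Or.inl ⟨t, htn, h1, by unfold pvVal at h2 ⊢; rwa [List.getD_append _ _ _ _ htn] at h2⟩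
    · have hte : t = xs.length := by omega
      subst hte
      refine Or.inr ⟨by exact_mod_cast h1, ?_⟩
      unfold pvVal at h2
      rw [List.getD_append_right _ _ _ _ (le_refl _)] at h2
      simpa using h2
  · rintro (⟨t, ht, h1, h2⟩ | ⟨h1, h2⟩)
    · refine ⟨t, by simp; omega, h1, ?_⟩
      unfold pvVal at h2 ⊢
      rwa [List.getD_append _ _ _ _ ht]
    · refine ⟨xs.length, by simp, by exact_mod_cast h1, ?_⟩
      unfold pvVal
      rw [List.getD_append_right _ _ _ _ (le_refl _)]
      simpa using h2

lemma pvSpecList_getD (nums V : List Int) (j : Nat) :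
    (pvSpecList nums V).getD j 0 =
      if j < V.length + nums.length then
        (if pvMark V.length nums j then 1 else V.getD j 0)
      else 0 := by
  unfold pvSpecList
  by_cases hj : j < V.length + nums.length
  · rw [if_pos hj, List.getD_eq_getElem?_getD, List.getElem?_map]
    simp [hj]
  · rw [if_neg hj, List.getD_eq_getElem?_getD, List.getElem?_eq_none (by simpa using hj)]
    rfl

lemma pvExtD (l l' : List Int) (hlen : l.length = l'.length)
    (h : ∀ j : Nat, j < l.length → l.getD j 0 = l'.getD j 0) : l = l' := by
  refine List.ext_getElem hlen ?_
  intro j h1 h2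
  rw [← List.getD_eq_getElem l 0 h1, ← List.getD_eq_getElem l' 0 h2]
  exact h j h1

lemma pvA_eq (nums V : List Int) : printV nums V = pvSpecList nums V := by
  induction nums using List.reverseRecOn with
  | nil =>
      unfold printV
      simp only [List.foldl_nil]
      refine pvExtD _ _ (by simp [pvSpecList_length]) ?_
      intro j hjl
      rw [pvSpecList_getD]
      have hm : pvMark V.length [] j = false := by unfold pvMark; simp
      rw [hm, if_pos (by simpa using hjl)]
      simp
  | append_singleton xs i ih =>
      simp only [printV] at ih ⊢
      rw [List.foldl_append, ih]
      simp only [List.foldl_cons, List.foldl_nil]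
      set W := pvSpecList xs V ++ [0] with hW
      have hWlen : W.length = V.length + xs.length + 1 := by
        simp [hW, pvSpecList_length]
      have hWget : ∀ j : Nat, W.getD j 0 =
          if j < V.length + xs.length + 1 then
            (if pvMark V.length xs j then 1 else V.getD j 0)
          else 0 := by
        intro j
        by_cases hj : j < V.length + xs.length
        · rw [hW, List.getD_append _ _ _ _ (by rw [pvSpecList_length]; exact hj),
            pvSpecList_getD, if_pos hj,
            if_pos (show j < V.length + xs.length + 1 by omega)]
        · by_cases hj1 : j = V.length + xs.length
          · subst hj1
            rw [hW, List.getD_append_right _ _ _ _ (by rw [pvSpecList_length]),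
              pvSpecList_length, Nat.sub_self,
              if_pos (show _ < V.length + xs.length + 1 by omega),
              pvMark_false_of_ge _ _ _ (le_refl _)]
            simp only [Bool.false_eq_true, if_false, List.getD_cons_zero]
            rw [List.getD_eq_default _ _ (by omega)]
          · rw [hW, List.getD_eq_default _ _ (by simp [pvSpecList_length]; omega),
              if_neg (by omega)]
      refine pvExtD _ _ ?_ ?_
      · rw [pvSpecList_length]
        by_cases hbr : ((W.length : Nat) : Int) < i
        · rw [if_pos hbr, pvSet_length, hWlen]
          simp; omega
        · rw [if_neg hbr, pvSet_length, hWlen]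
          simp; omega
      · intro j hjl
        have hj : j < V.length + xs.length + 1 := by
          by_cases hbr : ((W.length : Nat) : Int) < i
          · rw [if_pos hbr, pvSet_length, hWlen] at hjl; exact hjl
          · rw [if_neg hbr, pvSet_length, hWlen] at hjl; exact hjl
        rw [pvSpecList_getD,
          if_pos (show j < V.length + (xs ++ [i]).length by
            simp only [List.length_append, List.length_cons, List.length_nil]; omega)]
        by_cases hbr : ((W.length : Nat) : Int) < i
        · rw [if_pos hbr, pvSet_getD _ _ _ (le_refl 0),
            if_pos ⟨Int.natCast_nonneg j,
              by rw [hWlen]; push_cast; omega, by omega⟩]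
          have hm : pvMark V.length (xs ++ [i]) j = true := by
            rw [pvMark_append_iff]
            rw [hWlen] at hbr; push_cast at hbr
            exact Or.inr ⟨by omega, by omega⟩
          rw [hm, if_pos rfl]
        · rw [if_neg hbr, pvSet_getD _ _ _
            (by rw [hWlen] at hbr ⊢; push_cast at hbr ⊢; omega)]
          by_cases hnew : ((W.length : Nat) : Int) - i ≤ (j : Int)
          · rw [if_pos ⟨hnew, by rw [hWlen]; push_cast; omega, by omega⟩]
            have hm : pvMark V.length (xs ++ [i]) j = true := by
              rw [pvMark_append_iff]
              rw [hWlen] at hnew; push_cast at hnew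
              exact Or.inr ⟨by omega, by omega⟩
            rw [hm, if_pos rfl]
          · rw [if_neg (fun hc => hnew hc.1), hWget j, if_pos hj]
            by_cases hm : pvMark V.length xs j = true
            · rw [if_pos hm]
              have hm' : pvMark V.length (xs ++ [i]) j = true := by
                rw [pvMark_append_iff]; exact Or.inl hm
              rw [hm', if_pos rfl]
            · rw [if_neg hm]
              have hm' : ¬ pvMark V.length (xs ++ [i]) j = true := by
                rw [pvMark_append_iff]
                rintro (h | ⟨h1, h2⟩)
                · exact hm h
                · rw [hWlen] at hnew; push_cast at hnew; omega
              rw [if_neg hm']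

-- B side: the running minimum after k iterations of Source B's loop
def pvG (n0 : Nat) (nums : List Int) : Nat → Int
  | 0 => (n0 : Int) + nums.length
  | (k+1) =>
      let j : Int := (n0 : Int) + nums.length - (k + 1)
      if (n0 : Int) ≤ j then min (pvG n0 nums k) (j + 1 - nums.getD (j - n0).toNat 0)
      else pvG n0 nums k

lemma pvG_le (n0 : Nat) (nums : List Int) (k : Nat) (j : Int) :
    pvG n0 nums k ≤ j ↔ ((n0 : Int) + nums.length ≤ j ∨
      ∃ t : Nat, t < nums.length ∧ (n0 : Int) + nums.length - k ≤ (n0 : Int) + t ∧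
        pvVal n0 nums t ≤ j) := by
  induction k with
  | zero =>
      unfold pvG
      constructor
      · exact fun h => Or.inl h
      · rintro (h | ⟨t, ht, h1, -⟩)
        · exact h
        · omega
  | succ k ih =>
      unfold pvG
      by_cases hc : (n0 : Int) ≤ (n0 : Int) + nums.length - (k + 1)
      · rw [if_pos hc]
        have hkn : k + 1 ≤ nums.length := by omega
        set t0 : Nat := nums.length - (k + 1) with ht0
        have ht0c : ((n0 : Int) + nums.length - (k + 1) - n0).toNat = t0 := by omega
        have hval : (n0 : Int) + nums.length - (k + 1) + 1 -
            nums.getD ((n0 : Int) + nums.length - (k + 1) - (n0 : Int)).toNat 0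
            = pvVal n0 nums t0 := by
          rw [ht0c]
          unfold pvVal
          omega
        rw [min_le_iff, hval, ih]
        constructor
        · rintro ((h | ⟨t, ht, h1, h2⟩) | hv)
          · exact Or.inl h
          · exact Or.inr ⟨t, ht, by omega, h2⟩
          · exact Or.inr ⟨t0, by omega, by omega, hv⟩
        · rintro (h | ⟨t, ht, h1, h2⟩)
          · exact Or.inl (Or.inl h)
          · by_cases hlt : (n0 : Int) + nums.length - k ≤ (n0 : Int) + t
            · exact Or.inl (Or.inr ⟨t, ht, hlt, h2⟩)
            · have : t = t0 := by omega
              subst this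
              exact Or.inr h2
      · rw [if_neg hc, ih]
        have hkn : nums.length ≤ k := by omega
        constructor
        · rintro (h | ⟨t, ht, h1, h2⟩)
          · exact Or.inl h
          · exact Or.inr ⟨t, ht, by omega, h2⟩
        · rintro (h | ⟨t, ht, h1, h2⟩)
          · exact Or.inl h
          · exact Or.inr ⟨t, ht, by omega, h2⟩

lemma pvG_succ (n0 : Nat) (nums : List Int) (k : Nat) :
    pvG n0 nums (k + 1) = if (n0 : Int) ≤ (n0 : Int) + nums.length - ((k : Int) + 1) then
      min (pvG n0 nums k) ((n0 : Int) + nums.length - ((k : Int) + 1) + 1 -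
        nums.getD ((n0 : Int) + nums.length - ((k : Int) + 1) - (n0 : Int)).toNat 0)
    else pvG n0 nums k := by
  conv_lhs => unfold pvG

lemma pvB_fold (nums V : List Int) (m : Nat) (hm : m ≤ V.length + nums.length)
    (acc : List Int) :
    (PySem.List.pyRange ((m : Int) - 1) (-1) (-1)).foldl
      (fun (st : Int × List Int) j =>
        let best := if ((V.length : Int)) ≤ j then
            min st.1 (j + 1 - nums.getD (j - (V.length : Int)).toNat 0) else st.1
        (best, st.2 ++ [if best ≤ j then 1
          else if j < (V.length : Int) then V.getD j.toNat 0 else 0]))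
      (pvG V.length nums (V.length + nums.length - m), acc)
    = (pvG V.length nums (V.length + nums.length),
       acc ++ ((List.range m).reverse.map (fun j =>
         if pvG V.length nums (V.length + nums.length - j) ≤ (j : Int) then 1
         else if (j : Int) < (V.length : Int) then V.getD j 0 else 0))) := by
  induction m generalizing acc with
  | zero =>
      rw [show ((0 : Nat) : Int) - 1 = -1 by omega,
        PySem.List.pyRange_neg_one_eq_nil (le_refl _)]
      simp
  | succ m ih =>
      rw [show ((m + 1 : Nat) : Int) - 1 = (m : Int) by push_cast; ring,
        PySem.List.pyRange_neg_one_cons (by omega), List.foldl_cons]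
      have hbest : (if ((V.length : Int)) ≤ (m : Int) then
            min (pvG V.length nums (V.length + nums.length - (m + 1)))
              ((m : Int) + 1 - nums.getD ((m : Int) - (V.length : Int)).toNat 0)
          else pvG V.length nums (V.length + nums.length - (m + 1)))
          = pvG V.length nums (V.length + nums.length - m) := by
        have hk : V.length + nums.length - m = (V.length + nums.length - (m + 1)) + 1 := by
          omega
        rw [hk, pvG_succ]
        have hj : (V.length : Int) + (nums.length : Int) -
            (((V.length + nums.length - (m + 1) : Nat) : Int) + 1) = (m : Int) := by omega
        rw [hj]
      simp only []
      rw [hbest, ih (by omega)]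
      rw [List.range_succ]
      simp

lemma pvB_eq (nums V : List Int) : printV_alt nums V = pvSpecList nums V := by
  unfold printV_alt
  simp only []
  have hN : (V.length : Int) + (nums.length : Int) - 1
      = ((V.length + nums.length : Nat) : Int) - 1 := by push_cast; ring
  have h0 : ((V.length : Int) + (nums.length : Int), ([] : List Int))
      = (pvG V.length nums (V.length + nums.length - (V.length + nums.length)),
         ([] : List Int)) := by
    rw [Nat.sub_self]
    unfold pvG
    rfl
  rw [hN, h0, pvB_fold nums V (V.length + nums.length) (le_refl _) []]
  simp only [List.nil_append, List.map_reverse, List.reverse_reverse]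
  unfold pvSpecList
  refine List.map_congr_left ?_
  intro j hj
  rw [List.mem_range] at hj
  have hcast : ((V.length + nums.length - j : Nat) : Int)
      = (V.length : Int) + nums.length - j := by omega
  have hiff : pvG V.length nums (V.length + nums.length - j) ≤ (j : Int)
      ↔ pvMark V.length nums j = true := by
    rw [pvG_le, pvMark_iff, hcast]
    constructor
    · rintro (h | ⟨t, ht, h1, h2⟩)
      · omega
      · exact ⟨t, ht, by omega, h2⟩
    · rintro ⟨t, ht, h1, h2⟩
      exact Or.inr ⟨t, ht, by omega, h2⟩
  by_cases hmark : pvMark V.length nums j = true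
  · rw [if_pos (hiff.mpr hmark), hmark, if_pos rfl]
  · rw [if_neg (fun hc => hmark (hiff.mp hc)), if_neg hmark]
    by_cases hjV : j < V.length
    · rw [if_pos (by exact_mod_cast hjV)]
    · rw [if_neg (by omega), List.getD_eq_default _ _ (by omega)]

-- ===== VERDICT (by name: the statement is the Claim_ definition above) =====
theorem printV_spec : Claim_equal_printV := by
  intro nums V _
  unfold Spec_printV
  rw [pvA_eq, pvB_eq]
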